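-- pv_equiv track=rewrite | github.com/delishaandr/Tucil2_13519133 | src/graph_13519133.py | list_of_vertices
-- ===== SOURCE A (Python) =====
-- def list_of_vertices(line):
--     vertices = [] # list berisi simpul mata kuliah dan prerequisite-nya
--     namelist = [] # list of char tiap nama mata kuliah yang terbaca
--     for c in line:
--         if c == ' ':
--             continue
--         elif c == ',' or c == '.':
--             name = ''.join(namelist) # mengubah list menjadi string nama matakuliah
--             vertices.append(name)
--             namelist = []
--         else:
--             namelist.append(c)
--     return vertices
-- ===== SOURCE B (Python) =====
-- def list_of_vertices(line):
--     # clean-then-split: drop spaces, unify delimiters, split; drop the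
--     # unterminated trailing segment (A only emits a name at a delimiter)
--     parts = line.replace(' ', '').replace('.', ',').split(',')
--     return parts[:-1]
-- ===== Notes on version B (the rewrite author's own statement) =====
-- stated objective: idiomatic
-- what changed: Replaced the char-by-char accumulator loop with a two-phase clean-then-split: delete spaces and unify the two delimiters with str.replace, split on the delimiter, and drop the last (unterminated) segment.
import Mathlib
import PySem

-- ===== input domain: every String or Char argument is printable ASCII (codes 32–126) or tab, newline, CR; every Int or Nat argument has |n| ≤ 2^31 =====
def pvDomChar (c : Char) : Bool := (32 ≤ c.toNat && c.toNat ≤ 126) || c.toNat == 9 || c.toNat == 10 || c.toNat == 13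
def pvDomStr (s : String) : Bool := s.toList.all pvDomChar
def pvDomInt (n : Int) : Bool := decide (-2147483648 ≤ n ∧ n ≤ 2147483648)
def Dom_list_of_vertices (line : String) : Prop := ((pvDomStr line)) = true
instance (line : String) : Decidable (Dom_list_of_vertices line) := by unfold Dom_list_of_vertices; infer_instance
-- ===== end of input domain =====

-- B replaces A's char-by-char accumulator loop with an idiomatic clean-then-split
-- (replace spaces away, unify '.' to ',', split, drop the unterminated last segment).

-- ===== PORT A =====
-- literal transliteration of A's loop: state = (vertices, namelist)
def list_of_vertices (line : String) : List String :=
  (line.toList.foldl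
    (fun (st : List String × List Char) c =>
      if c = ' ' then st
      else if c = ',' ∨ c = '.' then (st.1 ++ [String.ofList st.2], [])
      else (st.1, st.2 ++ [c]))
    ([], [])).1

-- ===== PORT B =====
def list_of_vertices_alt (line : String) : List String :=
  let cleaned := PySem.Str.replace (PySem.Str.replace line " " "") "." ","
  -- cleaned.split(',') : no Str-level splitOn wrapper exists, so split on the char list
  let parts := (PySem.Chars.splitOn cleaned.toList [',']).map String.ofList
  PySem.List.slice parts none (some (-1))   -- parts[:-1]

-- ===== PRECONDITION & SPEC =====
def Spec_list_of_vertices (line : String) (out : List String) : Prop := out = list_of_vertices_alt line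
instance (line : String) (out : List String) : Decidable (Spec_list_of_vertices line out) := by unfold Spec_list_of_vertices; infer_instance

-- ===== CLAIM (what is proved, stated in full; the proofs are below) =====
def Claim_equal_list_of_vertices : Prop := ∀ (line : String), Dom_list_of_vertices line → Spec_list_of_vertices line (list_of_vertices line)

-- ===== LEMMAS AND PROOFS =====

-- reference splitter on char lists: split at each ','
def splitC : List Char → List (List Char)
  | [] => [[]]
  | c :: t => if c = ',' then [] :: splitC t else (splitC t).modifyHead (c :: ·)

theorem splitC_ne_nil (l : List Char) : splitC l ≠ [] := by
  cases l with
  | nil => simp [splitC]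
  | cons c t =>
    simp only [splitC]
    split_ifs <;> simp [List.modifyHead]
    · cases h : splitC t with
      | nil => exact absurd h (splitC_ne_nil t)
      | cons a b => simp

-- Chars.replace with a single-char pattern is a flatMap
theorem replace_go_single (o : Char) (new : List Char) :
    ∀ (fuel : Nat) (l acc : List Char), l.length ≤ fuel →
      PySem.Chars.replace.go [o] new fuel l acc
        = acc.reverse ++ l.flatMap (fun c => if c = o then new else [c]) := by
  intro fuel
  induction fuel with
  | zero => intro l acc h; cases l <;> simp_all [PySem.Chars.replace.go]
  | succ n ih =>
    intro l acc h
    cases l with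
    | nil => simp [PySem.Chars.replace.go]
    | cons c t =>
      simp only [PySem.Chars.replace.go, List.isPrefixOf, List.flatMap_cons]
      by_cases hc : c = o
      · subst hc
        simp only [BEq.rfl, Bool.true_and, if_true]
        rw [ih]
        · simp
        · simpa using Nat.le_of_succ_le_succ h
      · rw [if_neg (by simp [beq_iff_eq, (Ne.symm hc)]), ih]
        · simp [hc]
        · simpa using Nat.le_of_succ_le_succ h

theorem replace_single (o : Char) (new : List Char) (l : List Char) :
    PySem.Chars.replace l [o] new = l.flatMap (fun c => if c = o then new else [c]) := by
  simp [PySem.Chars.replace, replace_go_single o new l.length l [] (le_refl _)]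

-- Chars.splitOn with separator [','] is splitC
theorem splitOn_go_comma :
    ∀ (fuel : Nat) (l cur : List Char) (acc : List (List Char)), l.length < fuel →
      PySem.Chars.splitOn.go [','] fuel l cur acc
        = acc.reverse ++ (splitC l).modifyHead (cur.reverse ++ ·) := by
  intro fuel
  induction fuel with
  | zero => intro l cur acc h; omega
  | succ n ih =>
    intro l cur acc h
    cases l with
    | nil => simp [PySem.Chars.splitOn.go, splitC, List.modifyHead]
    | cons c t =>
      simp only [PySem.Chars.splitOn.go, List.isPrefixOf, splitC]
      by_cases hc : c = ','
      · subst hc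
        simp only [BEq.rfl, Bool.true_and, if_true]
        rw [ih]
        · cases hs : splitC t <;> simp [hs, List.modifyHead]
        · simpa using Nat.lt_of_succ_lt_succ h
      · rw [if_neg (by simp [beq_iff_eq, (Ne.symm hc)]), ih, if_neg hc]
        · cases hs : splitC t with
          | nil => exact absurd hs (splitC_ne_nil t)
          | cons a b => simp [List.modifyHead]
        · simpa using Nat.lt_of_succ_lt_succ h

theorem splitOn_comma (l : List Char) :
    PySem.Chars.splitOn l [','] = splitC l := by
  have h := splitOn_go_comma (l.length + 1) l [] [] (by omega)
  simp only [PySem.Chars.splitOn, h, List.reverse_nil, List.nil_append]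
  cases hs : splitC l with
  | nil => exact absurd hs (splitC_ne_nil l)
  | cons a b => simp [List.modifyHead]

theorem flatMap_space (l : List Char) :
    l.flatMap (fun c => if c = ' ' then [] else [c]) = l.filter (fun c => !(c = ' ')) := by
  induction l with
  | nil => rfl
  | cons c t ih => by_cases hc : c = ' ' <;> simp [hc, ih]

theorem flatMap_dot (l : List Char) :
    l.flatMap (fun c => if c = '.' then [','] else [c])
      = l.map (fun c => if c = '.' then ',' else c) := by
  induction l with
  | nil => rfl
  | cons c t ih => by_cases hc : c = '.' <;> simp [hc, ih]

-- the cleaned char list B splits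
def cleanC (l : List Char) : List Char :=
  (l.filter (fun c => !(c = ' '))).map (fun c => if c = '.' then ',' else c)

-- A's loop invariant against splitC of the cleaned list
theorem foldA_eq (cs : List Char) : ∀ (v : List String) (nl : List Char),
    (cs.foldl
      (fun (st : List String × List Char) c =>
        if c = ' ' then st
        else if c = ',' ∨ c = '.' then (st.1 ++ [String.ofList st.2], [])
        else (st.1, st.2 ++ [c]))
      (v, nl)).1
    = v ++ (((splitC (cleanC cs)).modifyHead (nl ++ ·)).dropLast).map String.ofList := by
  induction cs with
  | nil => intro v nl; simp [cleanC, splitC, List.modifyHead]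
  | cons c t ih =>
    intro v nl
    by_cases hsp : c = ' '
    · subst hsp
      simp only [List.foldl_cons, reduceIte]
      rw [ih]
      simp [cleanC]
    · by_cases hd : c = ',' ∨ c = '.'
      · have hclean : cleanC (c :: t) = ',' :: cleanC t := by
          rcases hd with h | h <;> subst h <;> simp [cleanC, List.filter]
        simp only [List.foldl_cons, if_neg hsp, if_pos hd]
        rw [ih, hclean]
        simp only [splitC, List.modifyHead]
        cases hs : splitC (cleanC t) with
        | nil => exact absurd hs (splitC_ne_nil _)
        | cons a b =>
          cases b <;> simp [List.dropLast]
      · have hne : ¬ c = ',' ∧ ¬ c = '.' := by tauto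
        have hclean : cleanC (c :: t) = c :: cleanC t := by
          simp [cleanC, List.filter, hsp, hne.2]
        simp only [List.foldl_cons, if_neg hsp, if_neg hd]
        rw [ih, hclean]
        simp only [splitC, if_neg hne.1]
        cases hs : splitC (cleanC t) with
        | nil => exact absurd hs (splitC_ne_nil _)
        | cons a b => simp [List.modifyHead]

theorem alt_eq (line : String) :
    list_of_vertices_alt line = ((splitC (cleanC line.toList)).dropLast).map String.ofList := by
  unfold list_of_vertices_alt
  rw [PySem.List.slice_to_neg_one]
  have h1 : (PySem.Str.replace (PySem.Str.replace line " " "") "." ",").toList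
      = cleanC line.toList := by
    rw [PySem.Str.toList_replace, PySem.Str.toList_replace]
    have e1 : (" " : String).toList = [' '] := by decide
    have e2 : ("" : String).toList = [] := by decide
    have e3 : ("." : String).toList = ['.'] := by decide
    have e4 : ("," : String).toList = [','] := by decide
    rw [e1, e2, e3, e4, replace_single, replace_single,
      flatMap_space, flatMap_dot]
    rfl
  rw [h1, splitOn_comma, ← List.map_dropLast]

-- ===== VERDICT (by name: the statement is the Claim_ definition above) =====
theorem list_of_vertices_spec : Claim_equal_list_of_vertices := by
  intro line _
  unfold Spec_list_of_vertices list_of_vertices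
  rw [alt_eq, foldA_eq]
  simp only [List.nil_append]
  cases hs : splitC (cleanC line.toList) with
  | nil => exact absurd hs (splitC_ne_nil _)
  | cons a b => simp [List.modifyHead]
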